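-- pv_equiv track=rewrite | github.com/anon-githubber/interpretable_graph_classifications | utilities/contrastivity.py | binarize_scores_list
-- ===== SOURCE A (Python) =====
-- def is_important(score, importance_ranges):
--     for start, end in importance_ranges:
--         if start <= score <= end:
--             return True
--     return False
--
-- def binarize_scores_list(scores_list, importance_ranges):
--     binarized_scores_list = []
--     for scores in scores_list:
--         s = ''
--         for score in scores:
--             if is_important(score, importance_ranges):
--                 s += '1'
--             else:
--                 s += '0'
--         binarized_scores_list.append(s)
--     return binarized_scores_list
-- ===== SOURCE B (Python) =====
-- def binarize_scores_list(scores_list, importance_ranges):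
--     # Preprocess: sort ranges by start and merge into disjoint intervals,
--     # dropping empty ranges (start > end), then binary-search per score.
--     merged = []
--     cur = None
--     for start, end in sorted(importance_ranges, key=lambda r: r[0]):
--         if start > end:
--             continue
--         if cur is None:
--             cur = (start, end)
--         elif start <= cur[1]:
--             if end > cur[1]:
--                 cur = (cur[0], end)
--         else:
--             merged.append(cur)
--             cur = (start, end)
--     if cur is not None:
--         merged.append(cur)
--     starts = [s for s, _ in merged]
--     n = len(merged)
--     out = []
--     for scores in scores_list:
--         bits = []
--         for score in scores:
--             lo, hi = 0, n
--             while lo < hi: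
--                 mid = (lo + hi) // 2
--                 if starts[mid] <= score:
--                     lo = mid + 1
--                 else:
--                     hi = mid
--             bits.append('1' if lo > 0 and score <= merged[lo - 1][1] else '0')
--         out.append(''.join(bits))
--     return out
-- ===== Notes on version B (the rewrite author's own statement) =====
-- stated objective: faster
-- what changed: Instead of scanning the raw range list for every score, B sorts the ranges once, merges them into disjoint intervals, and decides each score's bit by binary search on the merged starts.
import Mathlib
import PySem

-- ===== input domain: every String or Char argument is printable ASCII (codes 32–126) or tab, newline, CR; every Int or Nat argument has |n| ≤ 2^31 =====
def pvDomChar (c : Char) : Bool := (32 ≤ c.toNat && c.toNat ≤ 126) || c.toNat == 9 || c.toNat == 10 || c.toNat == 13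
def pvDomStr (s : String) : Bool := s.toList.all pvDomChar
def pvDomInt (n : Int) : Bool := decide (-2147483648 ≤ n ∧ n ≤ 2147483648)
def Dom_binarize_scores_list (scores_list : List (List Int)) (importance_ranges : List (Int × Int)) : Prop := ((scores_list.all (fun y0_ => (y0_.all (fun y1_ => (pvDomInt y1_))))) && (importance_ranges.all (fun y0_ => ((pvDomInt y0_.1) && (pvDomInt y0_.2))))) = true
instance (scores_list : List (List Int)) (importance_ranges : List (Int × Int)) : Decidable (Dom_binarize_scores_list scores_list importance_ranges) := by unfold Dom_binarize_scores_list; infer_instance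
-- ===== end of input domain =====

-- B sorts the ranges once, merges them into disjoint intervals and binary-searches
-- per score, instead of A's linear scan of all ranges for every score (objective: faster).

-- ===== PORT A =====
-- helper is_important: early-return loop over the ranges
def pvIsImportant (score : Int) (importance_ranges : List (Int × Int)) : Bool :=
  match importance_ranges with
  | [] => false
  | (s, e) :: rest =>
    if s ≤ score ∧ score ≤ e then true else pvIsImportant score rest

def binarize_scores_list (scores_list : List (List Int)) (importance_ranges : List (Int × Int)) : List String :=
  scores_list.foldl (fun acc scores =>
    acc ++ [String.mk (scores.foldl (fun s score =>
      s ++ (if pvIsImportant score importance_ranges then ['1'] else ['0'])) [])]) []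

-- ===== PORT B =====
-- one step of B's merge loop; state = (merged so far, current open interval)
def pvMergeStep (st : List (Int × Int) × Option (Int × Int)) (r : Int × Int) :
    List (Int × Int) × Option (Int × Int) :=
  if r.1 > r.2 then st
  else match st.2 with
    | none => (st.1, some r)
    | some c =>
      if r.1 ≤ c.2 then
        if r.2 > c.2 then (st.1, some (c.1, r.2)) else (st.1, some c)
      else (st.1 ++ [c], some r)

def pvMerged (importance_ranges : List (Int × Int)) : List (Int × Int) :=
  let st := (PySem.List.sorted importance_ranges (fun r => r.1) false).foldl pvMergeStep ([], none)
  match st.2 with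
  | none => st.1
  | some c => st.1 ++ [c]

-- Source B's hand-written bisect loop; starts[mid] is always in range, so getD is exact
def pvBisect (starts : List Int) (score : Int) (lo hi : Nat) : Nat :=
  if h : lo < hi then
    let mid := (lo + hi) / 2
    if starts.getD mid 0 ≤ score then pvBisect starts score (mid + 1) hi
    else pvBisect starts score lo mid
  else lo
termination_by hi - lo
decreasing_by all_goals omega

def binarize_scores_list_alt (scores_list : List (List Int)) (importance_ranges : List (Int × Int)) : List String :=
  let merged := pvMerged importance_ranges
  let starts := merged.map (fun r => r.1)
  let n := merged.length
  scores_list.foldl (fun out scores =>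
    out ++ [String.mk (scores.foldl (fun bits score =>
      let lo := pvBisect starts score 0 n
      bits ++ (if lo > 0 ∧ score ≤ (merged.getD (lo - 1) (0, 0)).2 then ['1'] else ['0'])) [])]) []

-- ===== PRECONDITION & SPEC =====
def Spec_binarize_scores_list (scores_list : List (List Int)) (importance_ranges : List (Int × Int)) (out : List String) : Prop := out = binarize_scores_list_alt scores_list importance_ranges
instance (scores_list : List (List Int)) (importance_ranges : List (Int × Int)) (out : List String) : Decidable (Spec_binarize_scores_list scores_list importance_ranges out) := by unfold Spec_binarize_scores_list; infer_instance

-- ===== CLAIM (what is proved, stated in full; the proofs are below) =====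
def Claim_equal_binarize_scores_list : Prop := ∀ (scores_list : List (List Int)) (importance_ranges : List (Int × Int)), Dom_binarize_scores_list scores_list importance_ranges → Spec_binarize_scores_list scores_list importance_ranges (binarize_scores_list scores_list importance_ranges)

-- ===== LEMMAS AND PROOFS =====

-- x lies in some range of l
def pvMemU (x : Int) (l : List (Int × Int)) : Prop := ∃ r ∈ l, r.1 ≤ x ∧ x ≤ r.2

-- merged-list shape invariant: nonempty intervals, pairwise disjoint and increasing
def pvGoodL (l : List (Int × Int)) : Prop :=
  (∀ r ∈ l, r.1 ≤ r.2) ∧ l.Pairwise (fun a b => a.2 < b.1)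

theorem pvIsImportant_iff (x : Int) (l : List (Int × Int)) :
    pvIsImportant x l = true ↔ pvMemU x l := by
  induction l with
  | nil => simp [pvIsImportant, pvMemU]
  | cons r rest ih =>
    obtain ⟨s, e⟩ := r
    simp only [pvIsImportant, pvMemU]
    by_cases h : s ≤ x ∧ x ≤ e
    · simp [h]
    · simp only [if_neg h, ih, pvMemU]
      constructor
      · rintro ⟨r, hr, h2⟩; exact ⟨r, List.mem_cons_of_mem _ hr, h2⟩
      · rintro ⟨r, hr, h2⟩
        rcases List.mem_cons.mp hr with rfl | hr
        · exact absurd h2 h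
        · exact ⟨r, hr, h2⟩


theorem pvMemU_append (x : Int) (l1 l2 : List (Int × Int)) :
    pvMemU x (l1 ++ l2) ↔ pvMemU x l1 ∨ pvMemU x l2 := by
  simp [pvMemU, List.mem_append, or_and_right, exists_or]

theorem pvMemU_cons (x : Int) (r : Int × Int) (rest : List (Int × Int)) :
    pvMemU x (r :: rest) ↔ (r.1 ≤ x ∧ x ≤ r.2) ∨ pvMemU x rest := by
  simp [pvMemU, List.mem_cons, or_and_right, exists_or]

theorem pvStep_inv (m : List (Int × Int)) (cur : Option (Int × Int)) (r : Int × Int)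
    (hg : pvGoodL (m ++ cur.toList))
    (hnil : cur = none → m = [])
    (hlb : ∀ c, cur = some c → c.1 ≤ r.1) :
    pvGoodL ((pvMergeStep (m, cur) r).1 ++ (pvMergeStep (m, cur) r).2.toList) ∧
    ((pvMergeStep (m, cur) r).2 = none → (pvMergeStep (m, cur) r).1 = []) ∧
    (∀ c', (pvMergeStep (m, cur) r).2 = some c' → (c'.1 = r.1 ∨ ∃ c, cur = some c ∧ c'.1 = c.1)) ∧
    (∀ x, pvMemU x ((pvMergeStep (m, cur) r).1 ++ (pvMergeStep (m, cur) r).2.toList) ↔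
          pvMemU x (m ++ cur.toList) ∨ (r.1 ≤ x ∧ x ≤ r.2)) := by
  by_cases hre : r.1 > r.2
  · simp only [pvMergeStep, if_pos hre]
    refine ⟨hg, hnil, fun c' hc' => Or.inr ⟨c', hc', rfl⟩, fun x => ?_⟩
    constructor
    · exact Or.inl
    · rintro (h | h); · exact h
      · omega
  · cases cur with
    | none =>
      have hm : m = [] := hnil rfl
      subst hm
      simp only [pvMergeStep, if_neg hre]
      refine ⟨⟨?_, ?_⟩, by simp, fun c' hc' => Or.inl (by cases hc'; rfl), fun x => ?_⟩
      · intro q hq; simp at hq; subst hq; omega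
      · simp
      · simp [pvMemU]
    | some c =>
      have hc1r : c.1 ≤ r.1 := hlb c rfl
      obtain ⟨hne, hpw⟩ := hg
      have hcc : c.1 ≤ c.2 := hne c (by simp)
      have hmlt : ∀ a ∈ m, a.2 < c.1 := by
        intro a ha
        have := (List.pairwise_append.mp hpw).2.2 a ha c (by simp)
        exact this
      have hpwm : m.Pairwise (fun a b => a.2 < b.1) := (List.pairwise_append.mp hpw).1
      have hnem : ∀ q ∈ m, q.1 ≤ q.2 := fun q hq => hne q (List.mem_append_left _ hq)
      by_cases hrc : r.1 ≤ c.2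
      · by_cases hrc2 : r.2 > c.2
        · simp only [pvMergeStep, if_neg hre, if_pos hrc, if_pos hrc2]
          refine ⟨⟨?_, ?_⟩, by simp, fun c' hc' => by cases hc'; exact Or.inr ⟨c, rfl, rfl⟩, fun x => ?_⟩
          · intro q hq
            rcases List.mem_append.mp hq with h | h
            · exact hnem q h
            · simp at h; subst h; simp; omega
          · rw [List.pairwise_append]
            exact ⟨hpwm, by simp, fun a ha b hb => by simp at hb; subst hb; exact hmlt a ha⟩
          · rw [pvMemU_append, pvMemU_append]
            simp only [pvMemU, Option.toList_some, List.mem_singleton]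
            constructor
            · rintro (h | ⟨q, rfl, h1, h2⟩); · exact Or.inl (Or.inl h)
              · simp at h1 h2
                by_cases h3 : x ≤ c.2
                · exact Or.inl (Or.inr ⟨c, rfl, h1, h3⟩)
                · exact Or.inr ⟨by omega, h2⟩
            · rintro ((h | ⟨q, hq, h1, h2⟩) | ⟨h1, h2⟩)
              · exact Or.inl h
              · subst q
                exact Or.inr ⟨(c.1, r.2), rfl, by simp; omega, by simp; omega⟩
              · exact Or.inr ⟨(c.1, r.2), rfl, by simp; omega, by simp; omega⟩
        · simp only [pvMergeStep, if_neg hre, if_pos hrc, if_neg hrc2]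
          refine ⟨⟨hne, hpw⟩, by simp, fun c' hc' => by cases hc'; exact Or.inr ⟨c, rfl, rfl⟩, fun x => ?_⟩
          constructor
          · exact Or.inl
          · rintro (h | ⟨h1, h2⟩); · exact h
            · rw [pvMemU_append]
              exact Or.inr ⟨c, by simp, by omega, by omega⟩
      · simp only [pvMergeStep, if_neg hre, if_neg hrc]
        refine ⟨⟨?_, ?_⟩, by simp, fun c' hc' => by cases hc'; exact Or.inl rfl, fun x => ?_⟩
        · intro q hq
          rcases List.mem_append.mp hq with h | h
          · exact hne q (by simpa using List.mem_append.mp h |>.elim (fun h => Or.inl h) (fun h => Or.inr (by simpa using h)))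
          · simp at h; subst h; omega
        · rw [List.pairwise_append]
          refine ⟨hpw, by simp, fun a ha b hb => ?_⟩
          simp at hb; subst hb
          rcases List.mem_append.mp ha with h | h
          · have := hmlt a h; omega
          · simp at h; subst h; omega
        · rw [pvMemU_append, pvMemU_append, pvMemU_append]
          simp only [pvMemU, Option.toList_some, List.mem_singleton]
          constructor
          · rintro ((h | h) | ⟨q, rfl, h1, h2⟩)
            · exact Or.inl (Or.inl h)
            · exact Or.inl (Or.inr h)
            · exact Or.inr ⟨h1, h2⟩
          · rintro ((h | h) | ⟨h1, h2⟩)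
            · exact Or.inl (Or.inl h)
            · exact Or.inl (Or.inr h)
            · exact Or.inr ⟨r, rfl, h1, h2⟩

theorem pvMerge_inv2 (l : List (Int × Int)) :
    ∀ (st : List (Int × Int) × Option (Int × Int)),
    l.Pairwise (fun a b => a.1 ≤ b.1) →
    (∀ c, st.2 = some c → ∀ r ∈ l, c.1 ≤ r.1) →
    pvGoodL (st.1 ++ st.2.toList) →
    (st.2 = none → st.1 = []) →
    (pvGoodL ((l.foldl pvMergeStep st).1 ++ (l.foldl pvMergeStep st).2.toList) ∧
     ((l.foldl pvMergeStep st).2 = none → (l.foldl pvMergeStep st).1 = []) ∧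
     ∀ x, (pvMemU x ((l.foldl pvMergeStep st).1 ++ (l.foldl pvMergeStep st).2.toList) ↔
           pvMemU x (st.1 ++ st.2.toList) ∨ pvMemU x l)) := by
  induction l with
  | nil =>
    intro st _ _ hg hnil
    refine ⟨hg, hnil, fun x => ?_⟩
    simp [pvMemU]
  | cons r rest ih =>
    intro st hs hlb hg hnil
    rw [List.foldl_cons]
    obtain ⟨hs1, hs2⟩ := List.pairwise_cons.mp hs
    obtain ⟨g', n', c', m'⟩ := pvStep_inv st.1 st.2 r hg hnil
      (fun c hc => hlb c hc r List.mem_cons_self)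
    have hlb' : ∀ c, (pvMergeStep st r).2 = some c → ∀ q ∈ rest, c.1 ≤ q.1 := by
      intro c hc q hq
      rcases c' c hc with h | ⟨c0, hc0, h⟩
      · rw [h]; exact hs1 q hq
      · rw [h]; exact hlb c0 hc0 q (List.mem_cons_of_mem _ hq)
    obtain ⟨gf, nf, mf⟩ := ih (pvMergeStep st r) hs2 hlb' g' n'
    refine ⟨gf, nf, fun x => ?_⟩
    rw [mf x, m' x, pvMemU_cons]
    tauto

theorem pvMerged_flat (l : List (Int × Int)) :
    pvMerged l =
      ((PySem.List.sorted l (fun r => r.1) false).foldl pvMergeStep ([], none)).1 ++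
      ((PySem.List.sorted l (fun r => r.1) false).foldl pvMergeStep ([], none)).2.toList := by
  unfold pvMerged
  cases h : ((PySem.List.sorted l (fun r => r.1) false).foldl pvMergeStep ([], none)).2 <;> simp [h]

theorem pvMerged_inv (l : List (Int × Int)) :
    pvGoodL (pvMerged l) ∧ ∀ x, (pvMemU x (pvMerged l) ↔ pvMemU x l) := by
  obtain ⟨g, _, m⟩ := pvMerge_inv2 (PySem.List.sorted l (fun r => r.1) false) ([], none)
    (PySem.List.sorted_pairwise l (fun r => r.1))
    (by intro c hc; simp at hc)
    (by constructor <;> simp)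
    (fun _ => rfl)
  rw [pvMerged_flat]
  refine ⟨g, fun x => ?_⟩
  rw [m x]
  simp only [pvMemU, List.nil_append, Option.toList_none, List.not_mem_nil, false_and,
    exists_const, false_or, PySem.List.mem_sorted]

theorem getD_mono (l : List Int) (hm : l.Pairwise (· ≤ ·)) (i j : Nat) (hij : i ≤ j) (hj : j < l.length) :
    l.getD i 0 ≤ l.getD j 0 := by
  rcases Nat.lt_or_ge i j with h | h
  · rw [List.getD_eq_getElem _ _ (lt_trans h hj), List.getD_eq_getElem _ _ hj]
    exact List.pairwise_iff_getElem.mp hm i j _ _ h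
  · have : i = j := le_antisymm hij h
    subst this; rfl

theorem pvBisect_spec (starts : List Int) (x : Int)
    (hmono : starts.Pairwise (· ≤ ·)) :
    ∀ lo hi, lo ≤ hi → hi ≤ starts.length →
    (∀ i, i < lo → starts.getD i 0 ≤ x) →
    (∀ i, hi ≤ i → i < starts.length → ¬ starts.getD i 0 ≤ x) →
    (lo ≤ pvBisect starts x lo hi ∧ pvBisect starts x lo hi ≤ hi ∧
     (∀ i, i < pvBisect starts x lo hi → starts.getD i 0 ≤ x) ∧
     (∀ i, pvBisect starts x lo hi ≤ i → i < starts.length → ¬ starts.getD i 0 ≤ x)) := by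
  intro lo hi
  induction lo, hi using pvBisect.induct starts x with
  | case1 lo hi h mid hle ih =>
    intro hlohi hhilen hbelow habove
    rw [pvBisect, dif_pos h, if_pos hle]
    have hmid : lo ≤ mid ∧ mid < hi := by simp only [mid]; omega
    obtain ⟨h1, h2, h3, h4⟩ := ih (by omega) hhilen
      (fun i hi2 => le_trans (getD_mono starts hmono i mid (by omega) (by omega)) hle)
      habove
    exact ⟨le_trans (by omega : lo ≤ mid + 1) h1, h2, h3, h4⟩
  | case2 lo hi h mid hgt ih =>
    intro hlohi hhilen hbelow habove
    rw [pvBisect, dif_pos h, if_neg hgt]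
    have hmid : lo ≤ mid ∧ mid < hi := by simp only [mid]; omega
    obtain ⟨h1, h2, h3, h4⟩ := ih (by omega) (by omega) hbelow
      (fun i hi2 hilen => fun hc =>
        hgt (le_trans (getD_mono starts hmono mid i hi2 hilen) hc))
    exact ⟨h1, le_trans h2 (by omega : mid ≤ hi), h3, h4⟩
  | case3 lo hi h =>
    intro hlohi hhilen hbelow habove
    rw [pvBisect, dif_neg h]
    have heq : lo = hi := by omega
    subst heq
    exact ⟨le_refl _, le_refl _, hbelow, habove⟩
theorem pvBit_iff (merged : List (Int × Int)) (x : Int) (hg : pvGoodL merged) :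
    ((0 < pvBisect (merged.map (fun r => r.1)) x 0 merged.length ∧
      x ≤ (merged.getD (pvBisect (merged.map (fun r => r.1)) x 0 merged.length - 1) (0, 0)).2) ↔
     pvMemU x merged) := by
  obtain ⟨hne, hpw⟩ := hg
  set starts := merged.map (fun r => r.1) with hstarts
  have hlen : starts.length = merged.length := List.length_map ..
  have hmono : starts.Pairwise (· ≤ ·) := by
    rw [hstarts, List.pairwise_map]
    exact hpw.imp_of_mem (fun {a b} ha hb h => by
      have := hne a ha; have := hne b hb; omega)
  have hget : ∀ i (h : i < merged.length), starts.getD i 0 = merged[i].1 := by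
    intro i h
    rw [List.getD_eq_getElem _ _ (by omega : i < starts.length)]
    simp [hstarts]
  obtain ⟨h1, h2, h3, h4⟩ := pvBisect_spec starts x hmono 0 merged.length (by omega) (by omega)
    (by omega) (fun i hi hlt => by omega)
  set r := pvBisect starts x 0 merged.length with hr
  constructor
  · rintro ⟨hr0, hx⟩
    have hrn : r - 1 < merged.length := by omega
    refine ⟨merged[r-1], List.getElem_mem _, ?_, ?_⟩
    · rw [← hget _ hrn]; exact h3 _ (by omega)
    · rwa [List.getD_eq_getElem _ _ hrn] at hx
  · rintro ⟨p, hp, hp1, hp2⟩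
    obtain ⟨i, hi, rfl⟩ := List.mem_iff_getElem.mp hp
    have hir : i < r := by
      by_contra hc
      exact h4 i (by omega) (by omega) (by rw [hget i hi]; exact hp1)
    have hr0 : 0 < r := by omega
    refine ⟨hr0, ?_⟩
    rw [List.getD_eq_getElem _ _ (by omega : r - 1 < merged.length)]
    rcases Nat.lt_or_ge i (r-1) with hlt | hge
    · exfalso
      have hdisj := List.pairwise_iff_getElem.mp hpw i (r-1) hi (by omega) hlt
      have := h3 (r-1) (by omega)
      rw [hget _ (by omega)] at this
      omega
    · have : i = r - 1 := by omega
      subst this; exact hp2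

theorem pvMerged_good (l : List (Int × Int)) : pvGoodL (pvMerged l) := (pvMerged_inv l).1

theorem pvMerged_mem (x : Int) (l : List (Int × Int)) :
    pvMemU x (pvMerged l) ↔ pvMemU x l := (pvMerged_inv l).2 x

theorem pvBit_eq (l : List (Int × Int)) (x : Int) :
    (decide (0 < pvBisect ((pvMerged l).map (fun r => r.1)) x 0 (pvMerged l).length ∧
      x ≤ ((pvMerged l).getD (pvBisect ((pvMerged l).map (fun r => r.1)) x 0 (pvMerged l).length - 1) (0, 0)).2))
    = pvIsImportant x l := by
  have key : (0 < pvBisect ((pvMerged l).map (fun r => r.1)) x 0 (pvMerged l).length ∧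
      x ≤ ((pvMerged l).getD (pvBisect ((pvMerged l).map (fun r => r.1)) x 0 (pvMerged l).length - 1) (0, 0)).2)
      ↔ pvIsImportant x l = true :=
    (pvBit_iff (pvMerged l) x (pvMerged_good l)).trans ((pvMerged_mem x l).trans (pvIsImportant_iff x l).symm)
  by_cases hp : (0 < pvBisect ((pvMerged l).map (fun r => r.1)) x 0 (pvMerged l).length ∧
      x ≤ ((pvMerged l).getD (pvBisect ((pvMerged l).map (fun r => r.1)) x 0 (pvMerged l).length - 1) (0, 0)).2)
  · rw [decide_eq_true hp, key.mp hp]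
  · cases hc : pvIsImportant x l with
    | false => exact decide_eq_false hp
    | true => exact absurd (key.mpr hc) hp

-- ===== VERDICT (by name: the statement is the Claim_ definition above) =====
theorem binarize_scores_list_spec : Claim_equal_binarize_scores_list := by
  intro scores_list importance_ranges _
  unfold Spec_binarize_scores_list binarize_scores_list binarize_scores_list_alt
  dsimp only
  have hfun : ∀ (bits : List Char) (score : Int),
      bits ++ (if 0 < pvBisect ((pvMerged importance_ranges).map (fun r => r.1)) score 0 (pvMerged importance_ranges).length ∧
        score ≤ ((pvMerged importance_ranges).getD (pvBisect ((pvMerged importance_ranges).map (fun r => r.1)) score 0 (pvMerged importance_ranges).length - 1) (0, 0)).2 then ['1'] else ['0'])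
      = bits ++ (if pvIsImportant score importance_ranges then ['1'] else ['0']) := by
    intro bits score
    rw [← pvBit_eq importance_ranges score]
    by_cases hp : (0 < pvBisect ((pvMerged importance_ranges).map (fun r => r.1)) score 0 (pvMerged importance_ranges).length ∧
        score ≤ ((pvMerged importance_ranges).getD (pvBisect ((pvMerged importance_ranges).map (fun r => r.1)) score 0 (pvMerged importance_ranges).length - 1) (0, 0)).2)
    · simp [hp]
    · simp [hp]
  simp only [hfun]
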